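-- pv_equiv track=rewrite | github.com/abdullah2k05/financial_rag_model | backend/app/services/parser.py | _find_header_index
-- ===== SOURCE A (Python) =====
-- from typing import List, Tuple, Optional
--
-- def _find_header_index(lines: List[str]) -> Optional[int]:
--     # Prefer a line that explicitly mentions 'booking date'
--     for i, line in enumerate(lines):
--         if "booking date" in line.lower():
--             return i
--     # Fallback: first line that has at least 3 delimiters (4 columns)
--     for i, line in enumerate(lines):
--         if line.count(",") >= 3 or line.count(";") >= 3:
--             return i
--     return None
-- ===== SOURCE B (Python) =====
-- from typing import List, Optional
--
-- def _find_header_index(lines: List[str]) -> Optional[int]: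
--     # One pass: return immediately on 'booking date'; remember first delimiter-rich line as fallback.
--     fallback = None
--     for i, line in enumerate(lines):
--         if "booking date" in line.lower():
--             return i
--         if fallback is None and (line.count(",") >= 3 or line.count(";") >= 3):
--             fallback = i
--     return fallback
-- ===== Notes on version B (the rewrite author's own statement) =====
-- stated objective: simpler
-- what changed: Replaces A's two sequential scans over the lines with a single pass that returns immediately on a 'booking date' line and carries the first delimiter-rich line as a fallback accumulator.
import Mathlib
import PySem

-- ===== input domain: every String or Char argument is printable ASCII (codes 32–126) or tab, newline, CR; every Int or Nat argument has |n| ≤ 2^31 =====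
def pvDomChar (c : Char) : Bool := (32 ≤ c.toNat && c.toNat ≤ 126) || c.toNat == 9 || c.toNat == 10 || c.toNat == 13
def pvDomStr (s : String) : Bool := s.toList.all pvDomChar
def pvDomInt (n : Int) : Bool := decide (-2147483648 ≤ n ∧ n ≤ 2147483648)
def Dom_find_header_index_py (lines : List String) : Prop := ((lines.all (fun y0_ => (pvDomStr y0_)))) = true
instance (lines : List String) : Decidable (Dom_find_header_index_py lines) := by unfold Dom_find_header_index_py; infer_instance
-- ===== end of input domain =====

-- B replaces A's two sequential scans with one pass carrying a first-delimiter-line fallback (objective: simpler).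


-- ===== PORT A =====
-- line.lower() contains "booking date"
def pvBooking (line : String) : Bool :=
  PySem.Str.isIn "booking date" (PySem.Str.lower line)

-- line.count(",") >= 3 or line.count(";") >= 3
def pvDelim (line : String) : Bool :=
  3 ≤ PySem.Str.count line "," || 3 ≤ PySem.Str.count line ";"

-- first loop of A: first index whose lowered line contains "booking date"
def pvScanBooking : List String → Int → Option Int
  | [], _ => none
  | l :: rest, i => if pvBooking l then some i else pvScanBooking rest (i + 1)

-- second loop of A: first index with at least 3 ',' or ';'
def pvScanDelim : List String → Int → Option Int
  | [], _ => none
  | l :: rest, i => if pvDelim l then some i else pvScanDelim rest (i + 1)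

def find_header_index_py (lines : List String) : Option Int :=
  match pvScanBooking lines 0 with
  | some i => some i
  | none => pvScanDelim lines 0

-- ===== PORT B =====
-- single pass with a fallback accumulator (Source B's loop)
def pvLoop : List String → Int → Option Int → Option Int
  | [], _, fb => fb
  | l :: rest, i, fb =>
    if pvBooking l then some i
    else pvLoop rest (i + 1) (if fb.isNone && pvDelim l then some i else fb)

def find_header_index_py_alt (lines : List String) : Option Int :=
  pvLoop lines 0 none

-- ===== PRECONDITION & SPEC =====
def Spec_find_header_index_py (lines : List String) (out : Option Int) : Prop := out = find_header_index_py_alt lines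
instance (lines : List String) (out : Option Int) : Decidable (Spec_find_header_index_py lines out) := by unfold Spec_find_header_index_py; infer_instance

-- ===== CLAIM (what is proved, stated in full; the proofs are below) =====
def Claim_equal_find_header_index_py : Prop := ∀ (lines : List String), Dom_find_header_index_py lines → Spec_find_header_index_py lines (find_header_index_py lines)

-- ===== LEMMAS AND PROOFS =====
theorem pvLoop_eq (ls : List String) : ∀ (i : Int) (fb : Option Int),
    pvLoop ls i fb =
      match pvScanBooking ls i with
      | some j => some j
      | none => match fb with
        | some f => some f
        | none => pvScanDelim ls i := by
  induction ls with
  | nil => intro i fb; cases fb <;> rfl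
  | cons l rest ih =>
    intro i fb
    by_cases hb : pvBooking l = true
    · simp [pvLoop, pvScanBooking, hb]
    · cases fb with
      | some f => simp [pvLoop, pvScanBooking, hb, ih]
      | none =>
        by_cases hd : pvDelim l = true
        · simp [pvLoop, pvScanBooking, pvScanDelim, hb, hd, ih]
        · simp [pvLoop, pvScanBooking, pvScanDelim, hb, hd, ih]

-- ===== VERDICT (by name: the statement is the Claim_ definition above) =====
theorem find_header_index_py_spec : Claim_equal_find_header_index_py := by
  intro lines _
  unfold Spec_find_header_index_py find_header_index_py find_header_index_py_alt
  rw [pvLoop_eq]
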